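-- pv_equiv track=rewrite | github.com/jarodise/jarodisedotcom | .agents/skills/wechat-to-blog/scripts/scrape_wechat.py | format_content_with_markdown
-- ===== SOURCE A (Python) =====
-- def format_content_with_markdown(title, content_text, images):
--     """Format content with markdown images at correct positions"""
--     lines = []
--     lines.append(f"Title: {title}")
--     lines.append("")
--     lines.append("--- IMAGES ---")
--     for img in images:
--         path = img.get('local_path', img['src'])
--         lines.append(f"[{img['index']}] {img['alt']}|{path}")
--     lines.append("")
--     lines.append("--- CONTENT WITH IMAGE POSITIONS ---")
--     lines.append("")
--
--     # Replace placeholders with markdown image syntax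
--     content = content_text
--     for img in images:
--         placeholder = f"<!-- IMAGE_PLACEHOLDER_{img['index']} -->"
--         path = img.get('local_path', f"IMAGE_URL_{img['index']}")
--         markdown_img = f"\n![{img['alt']}]({path})\n"
--         content = content.replace(placeholder, markdown_img)
--
--     lines.append(content)
--     return '\n'.join(lines)
-- ===== SOURCE B (Python) =====
-- def format_content_with_markdown(title, content_text, images):
--     """Format content with markdown images at correct positions.
--
--     Builds the header as one string expression, a first-wins placeholder
--     table by a reversed-iteration overwrite, and substitutes placeholders
--     in ONE left-to-right scan of the content instead of one .replace()
--     pass per image.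
--     """
--     header = ''.join('\n[{0}] {1}|{2}'.format(img['index'], img['alt'],
--                                               img.get('local_path', img['src']))
--                      for img in images)
--     table = {}
--     for img in reversed(images):
--         table['<!-- IMAGE_PLACEHOLDER_{0} -->'.format(img['index'])] = \
--             '\n![{0}]({1})\n'.format(img['alt'],
--                                      img.get('local_path', 'IMAGE_URL_{0}'.format(img['index'])))
--     parts = []
--     rest = content_text
--     while True:
--         i = rest.find('<!-- IMAGE_PLACEHOLDER_')
--         if i < 0:
--             parts.append(rest)
--             break
--         j = rest.find(' -->', i)
--         if j < 0:
--             parts.append(rest)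
--             break
--         key = rest[i:j + 4]
--         if key in table:
--             parts.append(rest[:i])
--             parts.append(table[key])
--             rest = rest[j + 4:]
--         else:
--             parts.append(rest[:i + 1])
--             rest = rest[i + 1:]
--     return ('Title: {0}\n\n--- IMAGES ---{1}\n\n--- CONTENT WITH IMAGE POSITIONS ---\n\n{2}'
--             .format(title, header, ''.join(parts)))
-- ===== Notes on version B (the rewrite author's own statement) =====
-- stated objective: faster
-- what changed: B replaces A's per-image sequential content.replace() passes and line-list join by a first-wins placeholder->markdown table (built by a reversed-iteration overwrite) plus a single left-to-right scan of the content, assembling the result by plain string concatenation.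
import Mathlib
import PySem

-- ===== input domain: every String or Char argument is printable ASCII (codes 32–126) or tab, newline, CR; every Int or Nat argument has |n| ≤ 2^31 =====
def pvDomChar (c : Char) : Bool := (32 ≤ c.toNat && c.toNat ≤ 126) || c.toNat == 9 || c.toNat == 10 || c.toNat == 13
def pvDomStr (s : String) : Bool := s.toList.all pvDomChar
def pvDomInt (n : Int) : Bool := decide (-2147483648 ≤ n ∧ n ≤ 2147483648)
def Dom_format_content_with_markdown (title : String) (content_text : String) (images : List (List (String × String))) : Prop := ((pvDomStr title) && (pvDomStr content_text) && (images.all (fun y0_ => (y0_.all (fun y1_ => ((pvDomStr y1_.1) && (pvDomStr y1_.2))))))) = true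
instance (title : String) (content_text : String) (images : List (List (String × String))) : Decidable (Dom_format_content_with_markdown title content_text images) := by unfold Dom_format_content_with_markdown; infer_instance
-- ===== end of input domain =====

-- B drops A's per-image sequential content.replace() passes: it builds a first-wins
-- placeholder table (reversed-iteration overwrite) and substitutes placeholders in one
-- left-to-right scan of the content, assembling the output by plain concatenation;
-- proved equal to A on Pre_.

-- ===== PORT A =====
-- per-image field accessors (dicts are assoc lists, first match wins) and line builders
def pvMark : List Char := ['<', '!', '-', '-', ' ', 'I', 'M', 'A', 'G', 'E', '_', 'P', 'L', 'A', 'C', 'E', 'H', 'O', 'L', 'D', 'E', 'R', '_']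
def pvTerm : List Char := [' ', '-', '-', '>']
def pvIdx (img : List (String × String)) : List Char := ((List.lookup "index" img).getD "").toList
def pvAlt (img : List (String × String)) : List Char := ((List.lookup "alt" img).getD "").toList
def pvHdrPath (img : List (String × String)) : List Char := ((List.lookup "local_path" img).getD ((List.lookup "src" img).getD "")).toList
def pvHeaderLine (img : List (String × String)) : List Char := "[".toList ++ pvIdx img ++ "] ".toList ++ pvAlt img ++ "|".toList ++ pvHdrPath img
def pvMdPath (img : List (String × String)) : List Char := match List.lookup "local_path" img with | some p => p.toList | none => "IMAGE_URL_".toList ++ pvIdx img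
def pvPh (img : List (String × String)) : List Char := pvMark ++ pvIdx img ++ pvTerm
def pvMd (img : List (String × String)) : List Char := "\n![".toList ++ pvAlt img ++ "](".toList ++ pvMdPath img ++ ")\n".toList

def format_content_with_markdown (title : String) (content_text : String) (images : List (List (String × String))) : String :=
  let lines1 : List (List Char) := ["Title: ".toList ++ title.toList, [], "--- IMAGES ---".toList]
  let lines2 : List (List Char) := images.foldl (fun ls img => ls ++ [pvHeaderLine img]) lines1
  let lines3 : List (List Char) := lines2 ++ [[], "--- CONTENT WITH IMAGE POSITIONS ---".toList, []]
  let content : List Char := images.foldl (fun c img => PySem.Chars.replace c (pvPh img) (pvMd img)) content_text.toList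
  String.ofList (PySem.Chars.join "\n".toList (lines3 ++ [content]))

-- ===== PORT B =====
-- B's own pieces: header line / placeholder key / markdown block, one string expression each
def bLine (img : List (String × String)) : List Char :=
  ("[" ++ (img.lookup "index").getD "" ++ "] " ++ (img.lookup "alt").getD "" ++ "|" ++
    (img.lookup "local_path").getD ((img.lookup "src").getD "")).toList
def bKey (img : List (String × String)) : List Char :=
  ("<!-- IMAGE_PLACEHOLDER_" ++ (img.lookup "index").getD "" ++ " -->").toList
def bImg (img : List (String × String)) : List Char :=
  ("\n![" ++ (img.lookup "alt").getD "" ++ "](" ++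
    (img.lookup "local_path").getD ("IMAGE_URL_" ++ (img.lookup "index").getD "") ++ ")\n").toList
def bMarker : List Char := "<!-- IMAGE_PLACEHOLDER_".toList
def bClose : List Char := " -->".toList

-- reversed-iteration overwrite: the overall effect is first-image-wins
def bTable (images : List (List (String × String))) : PySem.Dict (List Char) (List Char) :=
  images.reverse.foldl (fun t img => t.insert (bKey img) (bImg img)) PySem.Dict.empty

-- single left-to-right scan of the content, replacing placeholders via the table
def bScan (tbl : PySem.Dict (List Char) (List Char)) (rest : List Char) : List Char :=
  if hi : PySem.Chars.find rest bMarker < 0 then rest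
  else if hj : PySem.Chars.findFrom rest bClose (PySem.Chars.find rest bMarker) none < 0 then rest
  else
    if tbl.contains (PySem.List.slice rest (some (PySem.Chars.find rest bMarker)) (some (PySem.Chars.findFrom rest bClose (PySem.Chars.find rest bMarker) none + 4))) then
      PySem.List.slice rest none (some (PySem.Chars.find rest bMarker)) ++
        tbl.getD (PySem.List.slice rest (some (PySem.Chars.find rest bMarker)) (some (PySem.Chars.findFrom rest bClose (PySem.Chars.find rest bMarker) none + 4))) [] ++
        bScan tbl (PySem.List.slice rest (some (PySem.Chars.findFrom rest bClose (PySem.Chars.find rest bMarker) none + 4)) none)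
    else
      PySem.List.slice rest none (some (PySem.Chars.find rest bMarker + 1)) ++
        bScan tbl (PySem.List.slice rest (some (PySem.Chars.find rest bMarker + 1)) none)
  termination_by rest.length
  decreasing_by
  · rw [PySem.List.slice_from rest (by omega : (0:Int) ≤ PySem.Chars.findFrom rest bClose (PySem.Chars.find rest bMarker) none + 4)]
    have h1 : bMarker <:+: rest := (PySem.Chars.find_nonneg_iff rest bMarker).mp (by omega)
    have h2 : bMarker.length ≤ rest.length := h1.length_le
    have h3 : bMarker.length = 23 := by decide
    simp only [List.length_drop]
    omega
  · rw [PySem.List.slice_from rest (by omega : (0:Int) ≤ PySem.Chars.find rest bMarker + 1)]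
    have h1 : bMarker <:+: rest := (PySem.Chars.find_nonneg_iff rest bMarker).mp (by omega)
    have h2 : bMarker.length ≤ rest.length := h1.length_le
    have h3 : bMarker.length = 23 := by decide
    simp only [List.length_drop]
    omega

def format_content_with_markdown_alt (title : String) (content_text : String) (images : List (List (String × String))) : String :=
  String.ofList
    ("Title: ".toList ++ title.toList ++ "\n\n--- IMAGES ---".toList ++
     images.flatMap (fun img => '\n' :: bLine img) ++
     "\n\n--- CONTENT WITH IMAGE POSITIONS ---\n\n".toList ++
     bScan (bTable images) content_text.toList)

-- ===== PRECONDITION & SPEC =====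
-- Pre_ excludes images lacking an 'index'/'alt'/'src' key (A raises KeyError there) and
-- images whose index/alt/local_path value contains '<' (or whose index contains a newline
-- or ' -->'): on those A's sequential .replace() can re-match text inserted by an earlier
-- replacement and the placeholder boundaries become ambiguous, an accident of A's
-- implementation that no caller specifies.
def pvPreImg (img : List (String × String)) : Bool :=
  (List.lookup "index" img).isSome && (List.lookup "alt" img).isSome && (List.lookup "src" img).isSome &&
  (!(PySem.Str.isIn "<" ((List.lookup "index" img).getD "")) &&
   !(PySem.Str.isIn "\n" ((List.lookup "index" img).getD "")) &&
   !(PySem.Str.isIn " -->" ((List.lookup "index" img).getD ""))) &&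
  !(PySem.Str.isIn "<" ((List.lookup "alt" img).getD "")) &&
  (match List.lookup "local_path" img with
   | none => true
   | some p => !(PySem.Str.isIn "<" p))

def Pre_format_content_with_markdown (title : String) (content_text : String) (images : List (List (String × String))) : Prop :=
  images.all pvPreImg = true

instance (title : String) (content_text : String) (images : List (List (String × String))) : Decidable (Pre_format_content_with_markdown title content_text images) := by
  unfold Pre_format_content_with_markdown; infer_instance

def pvWitness_format_content_with_markdown : String × String × (List (List (String × String))) :=
  ("T", "a <!-- IMAGE_PLACEHOLDER_1 --> b", [[("index", "1"), ("alt", "pic"), ("src", "s")]])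

def Spec_format_content_with_markdown (title : String) (content_text : String) (images : List (List (String × String))) (out : String) : Prop := out = format_content_with_markdown_alt title content_text images
instance (title : String) (content_text : String) (images : List (List (String × String))) (out : String) : Decidable (Spec_format_content_with_markdown title content_text images out) := by unfold Spec_format_content_with_markdown; infer_instance

-- ===== CLAIM (what is proved, stated in full; the proofs are below) =====
def Claim_equal_format_content_with_markdown : Prop := ∀ (title : String) (content_text : String) (images : List (List (String × String))), Dom_format_content_with_markdown title content_text images → Pre_format_content_with_markdown title content_text images → Spec_format_content_with_markdown title content_text images (format_content_with_markdown title content_text images)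

-- ===== LEMMAS AND PROOFS =====

-- -------- B-side helpers expressed through A-side pieces --------

lemma bKey_eq (img : List (String × String)) : bKey img = pvPh img := by
  simp only [bKey, pvPh, pvIdx, String.toList_append]
  rw [show "<!-- IMAGE_PLACEHOLDER_".toList = pvMark from rfl,
      show " -->".toList = pvTerm from rfl]

lemma bImg_eq (img : List (String × String)) : bImg img = pvMd img := by
  simp only [bImg, pvMd, pvAlt, pvMdPath, pvIdx, String.toList_append]
  cases h : List.lookup "local_path" img with
  | none => simp [List.lookup, h, Option.getD, String.toList_append, List.append_assoc]
  | some p => simp [h, List.append_assoc]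

lemma bLine_eq (img : List (String × String)) : bLine img = pvHeaderLine img := by
  simp only [bLine, pvHeaderLine, pvIdx, pvAlt, pvHdrPath, String.toList_append, List.append_assoc]

lemma bMarker_eq : bMarker = pvMark := by decide
lemma bClose_eq : bClose = pvTerm := by decide

-- -------- generic list helpers --------

lemma pvDropAppend {α : Type} (l₁ l₂ : List α) (n : Nat) :
    (l₁ ++ l₂).drop n = l₁.drop n ++ l₂.drop (n - l₁.length) := by
  induction l₁ generalizing n with
  | nil => simp
  | cons a t ih =>
    cases n with
    | zero => simp
    | succ k => simpa using ih k

lemma pvTakeAppend {α : Type} (l₁ l₂ : List α) (n : Nat) :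
    (l₁ ++ l₂).take n = l₁.take n ++ l₂.take (n - l₁.length) := by
  induction l₁ generalizing n with
  | nil => simp
  | cons a t ih =>
    cases n with
    | zero => simp
    | succ k => simpa using ih k

lemma pvMemSingletonInfix {a : Char} {l : List Char} (h : a ∈ l) : [a] <:+: l := by
  obtain ⟨s, t, rfl⟩ := List.append_of_mem h
  exact ⟨s, t, by simp⟩

-- string-literal expansions used in the structural proofs
lemma pvL1 : "\n![".toList = ['\n', '!', '['] := by decide
lemma pvL2 : "](".toList = [']', '('] := by decide
lemma pvL3 : ")\n".toList = [')', '\n'] := by decide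
lemma pvL4 : "IMAGE_URL_".toList = ['I', 'M', 'A', 'G', 'E', '_', 'U', 'R', 'L', '_'] := by decide
lemma pvLlt : "<".toList = ['<'] := by decide
lemma pvLnl : "\n".toList = ['\n'] := by decide
lemma pvLterm : " -->".toList = pvTerm := by decide

-- -------- proof-layer definitions --------

-- well-formedness of a placeholder key and of a markdown replacement block
def pvKeyOK (idx : List Char) : Prop := '<' ∉ idx ∧ '\n' ∉ idx ∧ ¬ pvTerm <:+: idx
def pvWFk (p : List Char) : Prop := ∃ idx, pvKeyOK idx ∧ p = pvMark ++ idx ++ pvTerm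
def pvWFm (m : List Char) : Prop := ∃ mid, m = '\n' :: mid ++ ['\n'] ∧ '<' ∉ mid

-- the prefix-match predicate used by the simultaneous-replacement function
def pvPred (s : List Char) (pm : List Char × List Char) : Bool := !pm.1.isEmpty && pm.1.isPrefixOf s

-- a key of K matches at the head of s
def pvHit (K : List (List Char × List Char)) (s : List Char) : Prop := ∃ pm ∈ K, pm.1 ≠ [] ∧ pm.1 <+: s

-- structural version of Python's str.replace (for nonempty pattern)
def pvRep (p m : List Char) : List Char → List Char
  | [] => []
  | a :: t =>
    if (!p.isEmpty && p.isPrefixOf (a :: t)) = true then m ++ pvRep p m (t.drop (p.length - 1))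
    else a :: pvRep p m t
  termination_by c => c.length
  decreasing_by
  · simp only [List.length_drop, List.length_cons]; omega
  · simp

-- simultaneous first-wins replacement: at each position try the keys in order
def pvSim (K : List (List Char × List Char)) : List Char → List Char
  | [] => []
  | a :: t =>
    match K.find? (pvPred (a :: t)) with
    | some pm => pm.2 ++ pvSim K (t.drop (pm.1.length - 1))
    | none => a :: pvSim K t
  termination_by c => c.length
  decreasing_by
  · simp only [List.length_drop, List.length_cons]; omega
  · simp

-- the key/markdown table as a list, and the first value stored for a key
def pvKmap (images : List (List (String × String))) : List (List Char × List Char) :=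
  images.map (fun img => (pvPh img, pvMd img))

def pvFirst (images : List (List (String × String))) (k : List Char) : Option (List Char) :=
  match images with
  | [] => none
  | i :: L => if pvPh i = k then some (pvMd i) else pvFirst L k

-- -------- equation lemmas --------

lemma pvRep_nil (p m : List Char) : pvRep p m [] = [] := by rw [pvRep]

lemma pvRep_cons (p m : List Char) (a : Char) (t : List Char) :
    pvRep p m (a :: t) =
      if (!p.isEmpty && p.isPrefixOf (a :: t)) = true then m ++ pvRep p m (t.drop (p.length - 1))
      else a :: pvRep p m t := by rw [pvRep]

lemma pvSim_nil (K : List (List Char × List Char)) : pvSim K [] = [] := by rw [pvSim]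

lemma pvSim_cons_some (K : List (List Char × List Char)) (a : Char) (t : List Char)
    (pm : List Char × List Char) (h : K.find? (pvPred (a :: t)) = some pm) :
    pvSim K (a :: t) = pm.2 ++ pvSim K (t.drop (pm.1.length - 1)) := by rw [pvSim, h]

lemma pvSim_cons_none (K : List (List Char × List Char)) (a : Char) (t : List Char)
    (h : K.find? (pvPred (a :: t)) = none) :
    pvSim K (a :: t) = a :: pvSim K t := by rw [pvSim, h]

-- -------- basic facts --------

lemma pvPred_true_iff (s : List Char) (pm : List Char × List Char) :
    pvPred s pm = true ↔ (pm.1 ≠ [] ∧ pm.1 <+: s) := by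
  simp [pvPred, List.isPrefixOf_iff_prefix]

lemma pvFind?_none_iff (K : List (List Char × List Char)) (s : List Char) :
    K.find? (pvPred s) = none ↔ ¬ pvHit K s := by
  rw [List.find?_eq_none]
  constructor
  · rintro h ⟨pm, hmem, hne, hpre⟩
    exact h pm hmem ((pvPred_true_iff s pm).mpr ⟨hne, hpre⟩)
  · intro h pm hmem hp
    exact h ⟨pm, hmem, (pvPred_true_iff s pm).mp hp⟩

lemma pvWFk_ne_nil {p : List Char} (h : pvWFk p) : p ≠ [] := by
  obtain ⟨idx, _, rfl⟩ := h
  simp [pvMark]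

lemma pvWFk_head_tail {p : List Char} (h : pvWFk p) : ∃ t, p = '<' :: t ∧ '<' ∉ t := by
  obtain ⟨idx, ⟨hlt, _, _⟩, rfl⟩ := h
  refine ⟨pvMark.tail ++ idx ++ pvTerm, by simp [pvMark], ?_⟩
  intro hmem
  simp only [List.append_assoc, List.mem_append] at hmem
  rcases hmem with hmem | hmem | hmem
  · revert hmem; decide
  · exact hlt hmem
  · revert hmem; decide

lemma pvWFk_no_nl {p : List Char} (h : pvWFk p) : '\n' ∉ p := by
  obtain ⟨idx, ⟨_, hnl, _⟩, rfl⟩ := h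
  intro hmem
  simp only [List.append_assoc, List.mem_append] at hmem
  rcases hmem with hmem | hmem | hmem
  · revert hmem; decide
  · exact hnl hmem
  · revert hmem; decide

lemma pvWFk_length {p : List Char} (idx : List Char) (h : p = pvMark ++ idx ++ pvTerm) :
    p.length = 27 + idx.length := by
  subst h; simp [pvMark, pvTerm]; omega

lemma pvMark_prefix_of_key {p s : List Char} (h : pvWFk p) (hp : p <+: s) : pvMark <+: s := by
  obtain ⟨idx, _, rfl⟩ := h
  exact ((by simpa [List.append_assoc] using (List.prefix_append pvMark (idx ++ pvTerm)) : pvMark <+: pvMark ++ idx ++ pvTerm)).trans hp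

lemma pvHead_of_key_prefix {p s : List Char} (h : pvWFk p) (hp : p <+: s) :
    s.head? = some '<' := by
  obtain ⟨t, rfl, _⟩ := pvWFk_head_tail h
  cases s with
  | nil => simp at hp
  | cons b s' =>
    rw [List.cons_prefix_cons] at hp
    simp [hp.1.symm]

lemma pvNoHit_of_head {K : List (List Char × List Char)} (hK : ∀ pm ∈ K, pvWFk pm.1)
    {s : List Char} (hs : s.head? ≠ some '<') : ¬ pvHit K s := by
  rintro ⟨pm, hmem, _, hpre⟩
  exact hs (pvHead_of_key_prefix (hK pm hmem) hpre)

-- prefix of a drop is an infix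
lemma pvInfix_of_prefix_drop {u s : List Char} {n : Nat} (h : u <+: s.drop n) : u <:+: s := by
  obtain ⟨t, ht⟩ := h
  exact ⟨s.take n, t, by rw [List.append_assoc, ht, List.take_append_drop]⟩

-- -------- the placeholder-structure facts --------

-- no " -->" occurrence strictly inside u ++ " -->" ++ z when u starts one
lemma pvStrad (u z t : List Char) (hu : u ≠ []) (hpfx : ¬ pvTerm <+: u)
    (h : pvTerm ++ t = u ++ (pvTerm ++ z)) : False := by
  by_cases h4 : 4 ≤ u.length
  · apply hpfx
    have h1 : pvTerm = (pvTerm ++ t).take 4 := by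
      rw [pvTakeAppend]
      simp [pvTerm]
    rw [h, pvTakeAppend] at h1
    have hz : (4 : Nat) - u.length = 0 := by omega
    rw [hz] at h1
    simp only [List.take_zero, List.append_nil] at h1
    rw [h1]
    exact List.take_prefix 4 u
  · rcases u with _ | ⟨a, u⟩
    · exact hu rfl
    rcases u with _ | ⟨b, u⟩
    · simp [pvTerm] at h
    rcases u with _ | ⟨c, u⟩
    · simp [pvTerm] at h
    rcases u with _ | ⟨d, u⟩
    · simp [pvTerm] at h
    · simp at h4

-- no " -->" occurrence strictly inside idx before the terminator of idx ++ " -->"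
lemma pvTIN (idx z : List Char) (hT : ¬ pvTerm <:+: idx) (n : Nat) (hn : n < idx.length)
    (h : pvTerm <+: (idx ++ (pvTerm ++ z)).drop n) : False := by
  rw [pvDropAppend] at h
  have hz : (pvTerm ++ z).drop (n - idx.length) = pvTerm ++ z := by
    have h0 : n - idx.length = 0 := by omega
    rw [h0]; rfl
  rw [hz] at h
  obtain ⟨t, ht⟩ := h
  apply pvStrad (idx.drop n) z t
  · intro hnil
    rw [List.drop_eq_nil_iff] at hnil
    omega
  · intro hp
    exact hT (pvInfix_of_prefix_drop hp)
  · exact ht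

-- no " -->" occurrence inside the marker prefix
lemma pvTMark (w t : List Char) (n : Nat) (hn : n < 23)
    (h : pvTerm ++ t = pvMark.drop n ++ w) : False := by
  interval_cases n <;> simp [pvMark, pvTerm] at h

-- no " -->" occurrence before the terminator of a well-formed key
lemma pvNoEarly (idx z : List Char) (hK : pvKeyOK idx) (n : Nat) (hn : n < 23 + idx.length)
    (h : pvTerm <+: (pvMark ++ (idx ++ (pvTerm ++ z))).drop n) : False := by
  by_cases h23 : n < 23
  · rw [pvDropAppend] at h
    have h1 : pvMark.length = 23 := by decide
    have h0 : (idx ++ (pvTerm ++ z)).drop (n - pvMark.length) = idx ++ (pvTerm ++ z) := by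
      have : n - pvMark.length = 0 := by omega
      rw [this]; rfl
    rw [h0] at h
    obtain ⟨t, ht⟩ := h
    exact pvTMark _ t n h23 ht
  · rw [pvDropAppend] at h
    have h1 : pvMark.length = 23 := by decide
    have h2 : pvMark.drop n = [] := by
      rw [List.drop_eq_nil_iff]; omega
    rw [h2, h1, List.nil_append] at h
    exact pvTIN idx z hK.2.2 (n - 23) (by omega) h

-- a well-formed key that is a prefix of another extended key equals it
lemma pvKLT (i1 i2 t z : List Char) (h : i1 ++ (pvTerm ++ t) = i2 ++ (pvTerm ++ z))
    (hlt : i1.length < i2.length) (k2 : pvKeyOK i2) : False := by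
  have hd : (i2 ++ (pvTerm ++ z)).drop i1.length = pvTerm ++ t := by
    rw [← h, List.drop_left]
  exact pvTIN i2 z k2.2.2 i1.length hlt ⟨t, hd.symm⟩

lemma pvKUniq (i1 i2 z : List Char) (k1 : pvKeyOK i1) (k2 : pvKeyOK i2)
    (h : pvMark ++ i1 ++ pvTerm <+: (pvMark ++ i2 ++ pvTerm) ++ z) : i1 = i2 := by
  obtain ⟨t, ht⟩ := h
  have hE : i1 ++ (pvTerm ++ t) = i2 ++ (pvTerm ++ z) := by
    apply List.append_cancel_left (as := pvMark)
    calc pvMark ++ (i1 ++ (pvTerm ++ t)) = ((pvMark ++ i1) ++ pvTerm) ++ t := by simp [List.append_assoc]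
    _ = ((pvMark ++ i2) ++ pvTerm) ++ z := by simpa [List.append_assoc] using ht
    _ = pvMark ++ (i2 ++ (pvTerm ++ z)) := by simp [List.append_assoc]
  rcases lt_trichotomy i1.length i2.length with hlt | heq | hgt
  · exact absurd hE (fun hE => pvKLT i1 i2 t z hE hlt k2)
  · have h1 : (i1 ++ (pvTerm ++ t)).take i1.length = i1 := List.take_left' rfl
    have h2 : (i2 ++ (pvTerm ++ z)).take i1.length = i2 := by
      rw [heq]; exact List.take_left' rfl
    rw [← h1, hE, h2]
  · exact absurd hE.symm (fun hE' => pvKLT i2 i1 z t hE' hgt k1)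

-- at a given position at most one well-formed key can match
lemma pvKeyEq {p1 p2 s : List Char} (h1 : pvWFk p1) (h2 : pvWFk p2)
    (hp1 : p1 <+: s) (hp2 : p2 <+: s) : p1 = p2 := by
  obtain ⟨i1, k1, rfl⟩ := h1
  obtain ⟨i2, k2, rfl⟩ := h2
  rcases le_total (pvMark ++ i1 ++ pvTerm).length (pvMark ++ i2 ++ pvTerm).length with hle | hle
  · obtain ⟨w, hw⟩ := List.prefix_of_prefix_length_le hp1 hp2 hle
    have h' : pvMark ++ i1 ++ pvTerm <+: (pvMark ++ i2 ++ pvTerm) ++ [] := by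
      rw [List.append_nil]; exact ⟨w, hw⟩
    rw [pvKUniq i1 i2 [] k1 k2 h']
  · obtain ⟨w, hw⟩ := List.prefix_of_prefix_length_le hp2 hp1 hle
    have h' : pvMark ++ i2 ++ pvTerm <+: (pvMark ++ i1 ++ pvTerm) ++ [] := by
      rw [List.append_nil]; exact ⟨w, hw⟩
    rw [pvKUniq i2 i1 [] k2 k1 h']

-- inner positions of a well-formed key never start a key match
lemma pvKeyInner {k p' : List Char} (hk : pvWFk k) (hp' : pvWFk p') (q : Nat)
    (hq1 : 1 ≤ q) (hq2 : q < k.length) (X : List Char) :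
    ¬ p' <+: (k ++ X).drop q := by
  intro hpre
  obtain ⟨tl, htl, hlt⟩ := pvWFk_head_tail hk
  have hhd : ((k ++ X).drop q).head? = some '<' := pvHead_of_key_prefix hp' hpre
  rw [List.head?_drop, List.getElem?_append_left hq2] at hhd
  subst htl
  have hq2' : q - 1 < tl.length := by simp at hq2; omega
  have he : ('<' :: tl)[q]? = tl[q - 1]? := by
    cases q with
    | zero => omega
    | succ q' => simp
  rw [he, List.getElem?_eq_getElem hq2'] at hhd
  apply hlt
  have hx : tl[q - 1] = '<' := by injection hhd
  rw [← hx]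
  exact List.getElem_mem hq2'

-- -------- walking lemmas --------

lemma pvWalk (K : List (List Char × List Char)) :
    ∀ (r : Nat) (c : List Char), (∀ q, q < r → ¬ pvHit K (c.drop q)) →
      pvSim K c = c.take r ++ pvSim K (c.drop r) := by
  intro r
  induction r with
  | zero => intro c _; simp
  | succ r ih =>
    intro c h
    cases c with
    | nil => simp
    | cons a t =>
      have h0 : ¬ pvHit K (a :: t) := by simpa using h 0 (Nat.succ_pos r)
      rw [pvSim_cons_none K a t ((pvFind?_none_iff K (a :: t)).mpr h0)]
      rw [ih t (fun q hq => by simpa using h (q + 1) (by omega))]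
      simp

lemma pvRepWalk (p m : List Char) (hp : p ≠ []) :
    ∀ (r : Nat) (c : List Char), (∀ q, q < r → ¬ p <+: c.drop q) →
      pvRep p m c = c.take r ++ pvRep p m (c.drop r) := by
  intro r
  induction r with
  | zero => intro c _; simp
  | succ r ih =>
    intro c h
    cases c with
    | nil => simp [pvRep_nil]
    | cons a t =>
      have h0 : ¬ p <+: (a :: t) := by simpa using h 0 (Nat.succ_pos r)
      rw [pvRep_cons, if_neg (by simp [List.isPrefixOf_iff_prefix, h0])]
      rw [ih t (fun q hq => by simpa using h (q + 1) (by omega))]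
      simp

-- a markdown block passes through pvSim untouched
lemma pvMdPass (K : List (List Char × List Char)) (hK : ∀ pm ∈ K, pvWFk pm.1)
    (md X : List Char) (hm : pvWFm md) : pvSim K (md ++ X) = md ++ pvSim K X := by
  obtain ⟨mid, rfl, hmid⟩ := hm
  have hnolt : '<' ∉ ('\n' :: mid ++ ['\n']) := by
    intro hmem
    simp only [List.cons_append, List.mem_cons, List.mem_append, List.mem_singleton] at hmem
    rcases hmem with h | h | h
    · exact absurd h.symm (by decide)
    · exact hmid h
    · exact absurd h.symm (by decide)
  have hwalk := pvWalk K (('\n' :: mid ++ ['\n']).length) (('\n' :: mid ++ ['\n']) ++ X)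
    (fun q hq => by
      apply pvNoHit_of_head hK
      rw [List.head?_drop, List.getElem?_append_left hq, List.getElem?_eq_getElem hq]
      intro hc
      apply hnolt
      have hx : ('\n' :: mid ++ ['\n'])[q] = '<' := by injection hc
      rw [← hx]
      exact List.getElem_mem hq)
  rw [hwalk, List.take_left, List.drop_left]

-- replacement preserves newline-free prefixes
lemma pvPreserve (ph md : List Char) (hph : pvWFk ph) (hmd : pvWFm md) :
    ∀ (c p' : List Char), p' ≠ [] → '\n' ∉ p' → p' <+: pvRep ph md c → p' <+: c := by
  intro c
  induction c with
  | nil =>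
    intro p' hne _ hpre
    rw [pvRep_nil] at hpre
    exact absurd (List.prefix_nil.mp hpre) hne
  | cons a t ih =>
    intro p' hne hnl hpre
    rw [pvRep_cons] at hpre
    by_cases hcond : (!ph.isEmpty && ph.isPrefixOf (a :: t)) = true
    · rw [if_pos hcond] at hpre
      obtain ⟨mid, rfl, _⟩ := hmd
      cases p' with
      | nil => exact absurd rfl hne
      | cons b p'' =>
        have hb : b = '\n' := by
          obtain ⟨w, hw⟩ := hpre
          rw [List.cons_append] at hw
          have := congrArg List.head? hw
          simpa using this
        exact absurd (hb ▸ List.mem_cons_self) hnl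
    · rw [if_neg hcond] at hpre
      cases p' with
      | nil => exact absurd rfl hne
      | cons b p'' =>
        rw [List.cons_prefix_cons] at hpre
        obtain ⟨rfl, hpre2⟩ := hpre
        rcases Decidable.em (p'' = []) with h | h
        · subst h
          rw [List.cons_prefix_cons]
          exact ⟨rfl, List.nil_prefix⟩
        · have := ih p'' h (fun hm => hnl (List.mem_cons_of_mem _ hm)) hpre2
          rw [List.cons_prefix_cons]
          exact ⟨rfl, this⟩

-- find? transported to a string on which the same entry still matches first
lemma pvFind?_congr {α : Type} (K : List α) (P Q : α → Bool) (pm : α)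
    (h : K.find? P = some pm) (hQpm : Q pm = true)
    (himp : ∀ x ∈ K, Q x = true → P x = true) : K.find? Q = some pm := by
  induction K with
  | nil => simp at h
  | cons y K' ih =>
    by_cases hP : P y = true
    · rw [List.find?_cons_of_pos hP] at h
      injection h with h
      subst h
      rw [List.find?_cons_of_pos hQpm]
    · rw [List.find?_cons_of_neg hP] at h
      have hQ : ¬ Q y = true := by
        intro hQy
        exact hP (himp y List.mem_cons_self hQy)
      rw [List.find?_cons_of_neg hQ]
      exact ih h (fun x hx => himp x (List.mem_cons_of_mem y hx))

-- one simultaneous step at a matched position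
lemma pvSimStep (K : List (List Char × List Char)) (pm : List Char × List Char)
    (r s : List Char) (hf : K.find? (pvPred s) = some pm) (hs : pm.1 ++ r = s)
    (hp : pm.1 ≠ []) : pvSim K s = pm.2 ++ pvSim K r := by
  obtain ⟨p1, m1⟩ := pm
  cases p1 with
  | nil => exact absurd rfl hp
  | cons b tl =>
    subst hs
    rw [List.cons_append] at hf ⊢
    rw [pvSim_cons_some K b (tl ++ r) (b :: tl, m1) hf]
    simp [List.drop_left]

-- -------- the chain = simultaneous lemma --------

lemma pvKL (ph md : List Char) (K : List (List Char × List Char))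
    (hph : pvWFk ph) (hmd : pvWFm md) (hK : ∀ pm ∈ K, pvWFk pm.1 ∧ pvWFm pm.2) :
    ∀ (fuel : Nat) (c : List Char), c.length ≤ fuel →
      pvSim K (pvRep ph md c) = pvSim ((ph, md) :: K) c := by
  have hKk : ∀ pm ∈ K, pvWFk pm.1 := fun pm h => (hK pm h).1
  intro fuel
  induction fuel with
  | zero =>
    intro c hc
    have : c = [] := List.length_eq_zero_iff.mp (by omega)
    subst this
    simp [pvRep_nil, pvSim_nil]
  | succ fuel ih =>
    intro c hc
    cases c with
    | nil => simp [pvRep_nil, pvSim_nil]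
    | cons a t =>
      have hphne : ph ≠ [] := pvWFk_ne_nil hph
      by_cases hpre : ph <+: (a :: t)
      · -- the new key matches here
        have hcond : (!ph.isEmpty && ph.isPrefixOf (a :: t)) = true := by
          simp [List.isPrefixOf_iff_prefix, hpre, hphne]
        obtain ⟨r0, hr0⟩ := hpre
        have hplen : 1 ≤ ph.length := by
          cases ph with
          | nil => exact absurd rfl hphne
          | cons _ _ => simp
        have hr : t.drop (ph.length - 1) = r0 := by
          have h1 : (a :: t).drop ph.length = r0 := by rw [← hr0, List.drop_left]
          cases hlp : ph.length with
          | zero => omega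
          | succ n => rw [hlp] at h1; simpa using h1
        rw [pvRep_cons, if_pos hcond, hr]
        rw [pvMdPass K hKk md _ hmd]
        have hlen : r0.length ≤ fuel := by
          have h2 : (a :: t).length = ph.length + r0.length := by rw [← hr0]; simp
          simp only [List.length_cons] at h2 hc
          omega
        rw [ih r0 hlen]
        have hfp : ((ph, md) :: K).find? (pvPred (a :: t)) = some (ph, md) :=
          List.find?_cons_of_pos (by simpa [pvPred] using hcond)
        rw [pvSim_cons_some _ a t (ph, md) hfp, hr]
      · have hcond : ¬ (!ph.isEmpty && ph.isPrefixOf (a :: t)) = true := by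
          simp [List.isPrefixOf_iff_prefix, hpre]
        have hfp0 : ¬ pvPred (a :: t) (ph, md) = true := by
          simpa [pvPred] using hcond
        rw [pvRep_cons, if_neg hcond]
        cases hf : K.find? (pvPred (a :: t)) with
        | some pm =>
          have hpmP : pvPred (a :: t) pm = true := List.find?_some hf
          obtain ⟨hpmne, hpmpre⟩ := (pvPred_true_iff _ _).mp hpmP
          have hpmmem := List.mem_of_find?_eq_some hf
          have hpmwf : pvWFk pm.1 := hKk pm hpmmem
          obtain ⟨r, hrr⟩ := (pvPred_true_iff _ _).mp hpmP |>.2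
          have hpmlen : 1 ≤ pm.1.length := by
            cases hq : pm.1 with
            | nil => exact absurd hq hpmne
            | cons _ _ => simp
          -- pvRep localizes past the matched key
          have hnohit : ∀ q, q < pm.1.length → ¬ ph <+: (a :: t).drop q := by
            intro q hq
            rcases Nat.eq_zero_or_pos q with h0 | h1
            · subst h0; simpa using hpre
            · rw [← hrr]
              exact pvKeyInner hpmwf hph q h1 hq r
          have hdrop : (a :: t).drop pm.1.length = r := by rw [← hrr, List.drop_left]
          have hA : a :: pvRep ph md t = pm.1 ++ pvRep ph md r := by
            have hw := pvRepWalk ph md hphne pm.1.length (a :: t) hnohit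
            rw [pvRep_cons, if_neg hcond] at hw
            rw [hw, ← hrr, List.take_left, List.drop_left]
          rw [hA]
          -- the same entry is found on the rewritten string
          have hf2 : K.find? (pvPred (pm.1 ++ pvRep ph md r)) = some pm := by
            apply pvFind?_congr K (pvPred (a :: t)) _ pm hf
            · exact (pvPred_true_iff _ _).mpr ⟨hpmne, List.prefix_append _ _⟩
            · intro x hx hQ
              obtain ⟨hxne, hxpre⟩ := (pvPred_true_iff _ _).mp hQ
              have hxeq : x.1 = pm.1 :=
                pvKeyEq (hKk x hx) hpmwf hxpre (List.prefix_append _ _)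
              exact (pvPred_true_iff _ _).mpr ⟨hxne, hxeq ▸ hpmpre⟩
          rw [pvSimStep K pm (pvRep ph md r) _ hf2 rfl hpmne]
          have hlen : r.length ≤ fuel := by
            have h2 : (a :: t).length = pm.1.length + r.length := by rw [← hrr]; simp
            simp only [List.length_cons] at h2 hc
            omega
          rw [ih r hlen]
          have hfp2 : ((ph, md) :: K).find? (pvPred (a :: t)) = some pm := by
            rw [List.find?_cons_of_neg hfp0, hf]
          rw [pvSim_cons_some _ a t pm hfp2]
          congr 2
          rw [← hdrop]
          cases hlp : pm.1.length with
          | zero => omega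
          | succ n => simp
        | none =>
          have hnone2 : K.find? (pvPred (a :: pvRep ph md t)) = none := by
            rw [pvFind?_none_iff]
            rintro ⟨pm, hmem, hne, hpre'⟩
            have hrep : a :: pvRep ph md t = pvRep ph md (a :: t) := by
              rw [pvRep_cons, if_neg hcond]
            rw [hrep] at hpre'
            have hp' := pvPreserve ph md hph hmd (a :: t) pm.1 hne
              (pvWFk_no_nl (hKk pm hmem)) hpre'
            exact ((pvFind?_none_iff K (a :: t)).mp hf) ⟨pm, hmem, hne, hp'⟩
          rw [pvSim_cons_none K a _ hnone2]
          rw [ih t (by simp only [List.length_cons] at hc; omega)]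
          have hfp2 : ((ph, md) :: K).find? (pvPred (a :: t)) = none := by
            rw [List.find?_cons_of_neg hfp0, hf]
          rw [pvSim_cons_none _ a t hfp2]

-- pvSim with no keys is the identity
lemma pvSim_nil_keys : ∀ c : List Char, pvSim [] c = c := by
  intro c
  induction c with
  | nil => exact pvSim_nil []
  | cons a t ih => rw [pvSim_cons_none [] a t (by simp), ih]

-- -------- A's chain of replaces equals the simultaneous replacement --------

lemma pvChain (images : List (List (String × String)))
    (hK : ∀ img ∈ images, pvWFk (pvPh img) ∧ pvWFm (pvMd img)) :
    ∀ c0 : List Char,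
      images.foldl (fun c img => pvRep (pvPh img) (pvMd img) c) c0 = pvSim (pvKmap images) c0 := by
  induction images with
  | nil => intro c0; simp [pvKmap, pvSim_nil_keys]
  | cons i L ih =>
    intro c0
    have hKL : ∀ pm ∈ pvKmap L, pvWFk pm.1 ∧ pvWFm pm.2 := by
      intro pm hpm
      simp only [pvKmap, List.mem_map] at hpm
      obtain ⟨img, hmem, rfl⟩ := hpm
      exact hK img (List.mem_cons_of_mem i hmem)
    rw [List.foldl_cons, ih (fun img h => hK img (List.mem_cons_of_mem i h))]
    rw [pvKL (pvPh i) (pvMd i) (pvKmap L) (hK i List.mem_cons_self).1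
      (hK i List.mem_cons_self).2 hKL c0.length c0 le_rfl]
    rfl

-- -------- B's table, built by the reversed overwrite, is first-wins --------

lemma bTableGet (images : List (List (String × String))) (k : List Char) :
    (bTable images).get? k = pvFirst images k := by
  induction images with
  | nil => rfl
  | cons i L ih =>
    have hstep : bTable (i :: L) = (bTable L).insert (bKey i) (bImg i) := by
      rw [bTable, List.reverse_cons, List.foldl_append]
      rfl
    rw [hstep, bKey_eq, bImg_eq]
    by_cases hk : pvPh i = k
    · subst hk
      rw [PySem.Dict.get?_insert_self]
      simp [pvFirst]
    · rw [PySem.Dict.get?_insert_of_ne (bTable L) (pvMd i) (fun h => hk h.symm), ih]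
      simp [pvFirst, hk]

lemma bTableContains (images : List (List (String × String))) (k : List Char) :
    (bTable images).contains k = (pvFirst images k).isSome := by
  rw [PySem.Dict.contains_eq_isSome_get?, bTableGet]

lemma pvFirst_isSome_iff (images : List (List (String × String))) (k : List Char) :
    (pvFirst images k).isSome = true ↔ ∃ img ∈ images, pvPh img = k := by
  induction images with
  | nil => simp [pvFirst]
  | cons i L ih =>
    by_cases h : pvPh i = k
    · simp [pvFirst, h]
    · simp only [pvFirst, if_neg h, ih]
      constructor
      · rintro ⟨img, hmem, rfl⟩
        exact ⟨img, List.mem_cons_of_mem i hmem, rfl⟩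
      · rintro ⟨img, hmem, rfl⟩
        rcases List.mem_cons.mp hmem with rfl | hmem'
        · exact absurd rfl h
        · exact ⟨img, hmem', rfl⟩

-- the value the scan looks up is the value pvSim's first matching entry carries
lemma pvFindVal (images : List (List (String × String)))
    (s : List Char) (pm : List Char × List Char)
    (hf : (pvKmap images).find? (pvPred s) = some pm) :
    pvFirst images pm.1 = some pm.2 := by
  induction images with
  | nil => simp [pvKmap] at hf
  | cons i L ih =>
    rw [pvKmap, List.map_cons] at hf
    by_cases hp : pvPred s (pvPh i, pvMd i) = true
    · rw [List.find?_cons_of_pos hp] at hf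
      injection hf with hf
      subst hf
      simp [pvFirst]
    · rw [List.find?_cons_of_neg hp] at hf
      have hval := ih hf
      have hpm : pvPred s pm = true := List.find?_some hf
      have hne : pvPh i ≠ pm.1 := by
        intro h
        apply hp
        rw [pvPred_true_iff] at hpm ⊢
        exact ⟨by simp [h, hpm.1], by rw [h]; exact hpm.2⟩
      rw [pvFirst, if_neg hne]
      exact hval

-- -------- B's scan equals the simultaneous replacement --------

lemma bScanEq (images : List (List (String × String)))
    (hK : ∀ img ∈ images, pvWFk (pvPh img) ∧ pvWFm (pvMd img)) :
    ∀ (fuel : Nat) (c : List Char), c.length ≤ fuel →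
      bScan (bTable images) c = pvSim (pvKmap images) c := by
  have hKk : ∀ pm ∈ pvKmap images, pvWFk pm.1 := by
    intro pm hpm
    simp only [pvKmap, List.mem_map] at hpm
    obtain ⟨img, hmem, rfl⟩ := hpm
    exact (hK img hmem).1
  intro fuel
  induction fuel with
  | zero =>
    intro c hc
    have : c = [] := List.length_eq_zero_iff.mp (by omega)
    subst this
    rw [bScan, dif_pos (by decide : PySem.Chars.find [] bMarker < 0), pvSim_nil]
  | succ fuel ih =>
    intro c hc
    rw [bScan]
    simp only [bMarker_eq, bClose_eq]
    by_cases hi : PySem.Chars.find c pvMark < 0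
    · rw [dif_pos hi]
      have hneg : PySem.Chars.find c pvMark = -1 := by
        have := PySem.Chars.neg_one_le_find c pvMark
        omega
      have hni : ¬ pvMark <:+: c := (PySem.Chars.find_eq_neg_one_iff c pvMark).mp hneg
      have hw := pvWalk (pvKmap images) c.length c (fun q hq => by
        rintro ⟨pm, hmem, hne, hpre⟩
        exact hni (pvInfix_of_prefix_drop (pvMark_prefix_of_key (hKk pm hmem) hpre)))
      rw [hw]
      simp [pvSim_nil]
    · rw [dif_neg hi]
      have hi0 : 0 ≤ PySem.Chars.find c pvMark := by omega
      set n := (PySem.Chars.find c pvMark).toNat with hn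
      have hiIn : PySem.Chars.find c pvMark = (n : Int) := by omega
      have hnle : n ≤ c.length := by
        have := PySem.Chars.find_le_length c pvMark
        omega
      obtain ⟨hmarkpre, hmin⟩ := PySem.Chars.find_spec (s := c) (sub := pvMark) hi0
      rw [← hn] at hmarkpre hmin
      rw [hiIn]
      -- positions before n never start a key
      have hbefore : ∀ q, q < n → ¬ pvHit (pvKmap images) (c.drop q) := by
        rintro q hq ⟨pm, hmem, hne, hpre⟩
        exact hmin q hq (pvMark_prefix_of_key (hKk pm hmem) hpre)
      by_cases hj : PySem.Chars.findFrom c pvTerm ((n : Int)) none < 0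
      · rw [dif_pos hj]
        have hjneg : PySem.Chars.findFrom c pvTerm ((n : Int)) none = -1 := by
          rw [PySem.Chars.findFrom_natCast c pvTerm n hnle] at hj ⊢
          split_ifs at hj ⊢ with h
          · rfl
          · have := PySem.Chars.neg_one_le_find (c.drop n) pvTerm
            omega
        have hnT : ¬ pvTerm <:+: c.drop n :=
          (PySem.Chars.findFrom_natCast_eq_neg_one_iff c pvTerm n hnle).mp hjneg
        have hw := pvWalk (pvKmap images) c.length c (fun q hq => by
          rintro ⟨pm, hmem, hne, hpre⟩
          have hqn : n ≤ q := by
            by_contra hcon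
            exact hmin q (by omega) (pvMark_prefix_of_key (hKk pm hmem) hpre)
          obtain ⟨idx, hkok, hkey⟩ := hKk pm hmem
          apply hnT
          have hterm : pvTerm <:+: pm.1 := ⟨pvMark ++ idx, [], by simp [hkey, List.append_assoc]⟩
          have h1 : pvTerm <:+: c.drop q := hterm.trans hpre.isInfix
          have h2 : c.drop q = (c.drop n).drop (q - n) := by
            rw [List.drop_drop]
            congr 1
            omega
          rw [h2] at h1
          exact h1.trans (List.drop_suffix _ _).isInfix)
        rw [hw]
        simp [pvSim_nil]
      · rw [dif_neg hj]
        have hj0 : 0 ≤ PySem.Chars.findFrom c pvTerm ((n : Int)) none := by omega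
        set m := (PySem.Chars.findFrom c pvTerm ((n : Int)) none).toNat with hm
        have hjIm : PySem.Chars.findFrom c pvTerm ((n : Int)) none = (m : Int) := by omega
        obtain ⟨hjge, hTpre, hTmin⟩ := PySem.Chars.findFrom_natCast_spec c pvTerm n hnle (by omega)
        rw [← hm] at hTpre hTmin
        have hnm : n ≤ m := by
          rw [hjIm] at hjge
          exact_mod_cast hjge
        have hm4 : m + 4 ≤ c.length := by
          have h1 := hTpre.length_le
          have h2 : pvTerm.length = 4 := by decide
          simp only [List.length_drop] at h1
          omega
        rw [hjIm]
        have hc1 : ((m : Int) + 4) = (((m + 4 : Nat)) : Int) := by push_cast; ring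
        have hc2 : ((n : Int) + 1) = (((n + 1 : Nat)) : Int) := by push_cast; ring
        rw [hc1, hc2]
        rw [PySem.List.slice_natCast c n (m + 4)]
        rw [PySem.List.slice_to c (by positivity : (0:Int) ≤ ((n : Nat) : Int))]
        rw [PySem.List.slice_to c (by positivity : (0:Int) ≤ (((n + 1 : Nat)) : Int))]
        rw [PySem.List.slice_from c (by positivity : (0:Int) ≤ (((m + 4 : Nat)) : Int))]
        rw [PySem.List.slice_from c (by positivity : (0:Int) ≤ (((n + 1 : Nat)) : Int))]
        simp only [Int.toNat_natCast]
        set key := (c.drop n).take (m + 4 - n) with hkeydef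
        have hkeypre : key <+: c.drop n := List.take_prefix _ _
        have hkeylen : key.length = m + 4 - n := by
          rw [hkeydef]
          simp only [List.length_take, List.length_drop]
          omega
        have hdecomp : key ++ c.drop (m + 4) = c.drop n := by
          have h1 : (c.drop n).drop (m + 4 - n) = c.drop (m + 4) := by
            rw [List.drop_drop]
            congr 1
            omega
          rw [hkeydef, ← h1, List.take_append_drop]
        by_cases hcont : (bTable images).contains key = true
        · rw [if_pos hcont]
          obtain ⟨img0, hmem0, hph0⟩ :=
            (pvFirst_isSome_iff images key).mp (by rw [← bTableContains]; exact hcont)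
          have hkeywf : pvWFk key := hph0 ▸ (hK img0 hmem0).1
          have hkeyne : key ≠ [] := pvWFk_ne_nil hkeywf
          have hpred0 : pvPred (c.drop n) (pvPh img0, pvMd img0) = true :=
            (pvPred_true_iff _ _).mpr ⟨by rw [hph0]; exact hkeyne, by rw [hph0]; exact hkeypre⟩
          have hfsome : ((pvKmap images).find? (pvPred (c.drop n))).isSome = true := by
            rw [List.find?_isSome]
            refine ⟨(pvPh img0, pvMd img0), ?_, hpred0⟩
            simp only [pvKmap, List.mem_map]
            exact ⟨img0, hmem0, rfl⟩
          obtain ⟨pm, hf⟩ := Option.isSome_iff_exists.mp hfsome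
          obtain ⟨hpmne, hpmpre⟩ := (pvPred_true_iff _ _).mp (List.find?_some hf)
          have hpmwf : pvWFk pm.1 := hKk pm (List.mem_of_find?_eq_some hf)
          have hpm1 : pm.1 = key := pvKeyEq hpmwf hkeywf hpmpre hkeypre
          have hval : (bTable images).getD key [] = pm.2 := by
            have h1 := pvFindVal images (c.drop n) pm hf
            rw [hpm1] at h1
            have h2 : (bTable images).getD key [] = ((bTable images).get? key).getD [] := rfl
            rw [h2, bTableGet, h1]
            rfl
          have hwalkn := pvWalk (pvKmap images) n c hbefore
          have hstep := pvSimStep (pvKmap images) pm (c.drop (m + 4)) (c.drop n) hf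
            (by rw [hpm1]; exact hdecomp) hpmne
          have hih := ih (c.drop (m + 4)) (by simp only [List.length_drop]; omega)
          rw [hval, hih, hwalkn, hstep]
          simp [List.append_assoc]
        · rw [if_neg hcont]
          have hnothit : ∀ q, q < n + 1 → ¬ pvHit (pvKmap images) (c.drop q) := by
            intro q hq
            rcases Nat.lt_or_ge q n with h | h
            · exact hbefore q h
            · have hqn : q = n := by omega
              subst hqn
              rintro ⟨pm, hmem, hne, hpre⟩
              obtain ⟨idx', hkok', hkey'⟩ := hKk pm hmem
              obtain ⟨w, hw⟩ := id hpre
              have hplen : pm.1.length = 27 + idx'.length := pvWFk_length idx' hkey'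
              have hp0 : pvTerm <+: c.drop (n + (23 + idx'.length)) := by
                have h1 : c.drop (n + (23 + idx'.length)) = (c.drop n).drop (23 + idx'.length) := by
                  rw [List.drop_drop]
                rw [h1, ← hw]
                have h2 : pm.1 ++ w = (pvMark ++ idx') ++ (pvTerm ++ w) := by
                  rw [hkey']; simp [List.append_assoc]
                rw [h2]
                have h3 : (pvMark ++ idx').length = 23 + idx'.length := by
                  simp [pvMark]; omega
                rw [← h3, List.drop_left]
                exact List.prefix_append _ _
              have hmle : m ≤ n + (23 + idx'.length) := by
                by_contra hcon
                exact hTmin (n + (23 + idx'.length)) (by omega) (by omega) hp0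
              have hmge : ¬ (m < n + (23 + idx'.length)) := by
                intro hlt
                have h1 : pvTerm <+: (c.drop n).drop (m - n) := by
                  rw [List.drop_drop]
                  have h2 : n + (m - n) = m := by omega
                  rw [h2]
                  exact hTpre
                rw [← hw] at h1
                have h2 : pm.1 ++ w = pvMark ++ (idx' ++ (pvTerm ++ w)) := by
                  rw [hkey']; simp [List.append_assoc]
                rw [h2] at h1
                exact pvNoEarly idx' w hkok' (m - n) (by omega) h1
              have hmeq : m = n + 23 + idx'.length := by omega
              have hlen' : pm.1.length = m + 4 - n := by omega
              have hpmkey : pm.1 = key := by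
                have h1 := (List.prefix_iff_eq_take).mp hpre
                rw [h1, hlen', hkeydef]
              apply hcont
              rw [bTableContains, pvFirst_isSome_iff]
              simp only [pvKmap, List.mem_map] at hmem
              obtain ⟨img', hmem', heq'⟩ := hmem
              refine ⟨img', hmem', ?_⟩
              rw [← hpmkey, ← heq']
          have hwalk := pvWalk (pvKmap images) (n + 1) c hnothit
          have hih := ih (c.drop (n + 1)) (by simp only [List.length_drop]; omega)
          rw [hih, hwalk]

-- -------- extracting well-formedness from Pre_ --------

lemma pvPreWF (images : List (List (String × String)))
    (h : images.all pvPreImg = true) :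
    ∀ img ∈ images, pvWFk (pvPh img) ∧ pvWFm (pvMd img) := by
  intro img hmem
  have himg : pvPreImg img = true := by
    rw [List.all_eq_true] at h
    exact h img hmem
  unfold pvPreImg at himg
  simp only [Bool.and_eq_true, Bool.not_eq_true'] at himg
  obtain ⟨⟨⟨⟨⟨hsome1, hsome2⟩, hsome3⟩, ⟨⟨hidx1, hidx2⟩, hidx3⟩⟩, halt⟩, hlp⟩ := himg
  have hIdxOK : pvKeyOK (pvIdx img) := by
    refine ⟨?_, ?_, ?_⟩
    · intro hmem'
      have hbr : PySem.Chars.isIn "<".toList (pvIdx img) = false := by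
        simpa [pvIdx] using hidx1
      rw [PySem.Chars.isIn_eq_false_iff] at hbr
      exact hbr (pvLlt ▸ pvMemSingletonInfix hmem')
    · intro hmem'
      have hbr : PySem.Chars.isIn "\n".toList (pvIdx img) = false := by
        simpa [pvIdx] using hidx2
      rw [PySem.Chars.isIn_eq_false_iff] at hbr
      exact hbr (pvLnl ▸ pvMemSingletonInfix hmem')
    · intro hinf
      have hbr : PySem.Chars.isIn " -->".toList (pvIdx img) = false := by
        simpa [pvIdx] using hidx3
      rw [PySem.Chars.isIn_eq_false_iff] at hbr
      exact hbr (pvLterm ▸ hinf)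
  refine ⟨⟨pvIdx img, hIdxOK, rfl⟩, ?_⟩
  refine ⟨['!', '['] ++ pvAlt img ++ [']', '('] ++ pvMdPath img ++ [')'], ?_, ?_⟩
  · rw [pvMd, pvL1, pvL2, pvL3]
    simp [List.append_assoc]
  · intro hmem'
    have haltlt : '<' ∉ pvAlt img := by
      intro hmem''
      have hbr : PySem.Chars.isIn "<".toList (pvAlt img) = false := by
        simpa [pvAlt] using halt
      rw [PySem.Chars.isIn_eq_false_iff] at hbr
      exact hbr (pvLlt ▸ pvMemSingletonInfix hmem'')
    have hpathlt : '<' ∉ pvMdPath img := by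
      revert hlp
      cases hlpm : List.lookup "local_path" img with
      | none =>
        intro _
        simp only [pvMdPath, hlpm, pvL4]
        intro hmem''
        rcases List.mem_append.mp hmem'' with h' | h'
        · revert h'; decide
        · exact hIdxOK.1 h'
      | some p =>
        intro hlp
        simp only [pvMdPath, hlpm]
        intro hmem''
        have hbr : PySem.Chars.isIn "<".toList p.toList = false := by
          simpa using hlp
        rw [PySem.Chars.isIn_eq_false_iff] at hbr
        exact hbr (pvLlt ▸ pvMemSingletonInfix hmem'')
    simp only [List.append_assoc, List.mem_append, List.mem_cons, List.mem_singleton] at hmem'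
    rcases hmem' with h' | h' | h' | h' | h' | h'
    · rcases h' with h' | h' <;> (revert h'; decide)
    · exact haltlt h'
    · rcases h' with h' | h' <;> (revert h'; decide)
    · exact hpathlt h'
    · revert h'; decide
    · revert h'; decide

-- -------- fold-shape and join-shape lemmas --------

lemma pvFoldLines (L : List (List (String × String))) :
    ∀ init : List (List Char),
      L.foldl (fun ls img => ls ++ [pvHeaderLine img]) init = init ++ L.map pvHeaderLine := by
  induction L with
  | nil => intro init; simp
  | cons i L ih => intro init; rw [List.foldl_cons, ih]; simp

-- join with "\n" over a nonempty list = head ++ newline-prefixed tail blocks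
lemma pvJoinShape : ∀ (l : List (List Char)) (x : List Char),
    PySem.Chars.join "\n".toList (x :: l) = x ++ l.flatMap (fun y => '\n' :: y) := by
  intro l
  induction l with
  | nil => intro x; simp [PySem.Chars.join_singleton]
  | cons y l' ih =>
    intro x
    rw [PySem.Chars.join_cons_cons, ih y]
    simp [pvLnl]

-- the go loop of PySem's replace, characterised
lemma pvReplaceGo (p m : List Char) (hp : p ≠ []) :
    ∀ (fuel : Nat) (l acc : List Char), l.length ≤ fuel →
      PySem.Chars.replace.go p m fuel l acc = acc.reverse ++ pvRep p m l := by
  intro fuel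
  induction fuel with
  | zero =>
    intro l acc hl
    have : l = [] := List.length_eq_zero_iff.mp (by omega)
    subst this
    simp [PySem.Chars.replace.go, pvRep_nil]
  | succ fuel ih =>
    intro l acc hl
    cases l with
    | nil => simp [PySem.Chars.replace.go, pvRep_nil]
    | cons a t =>
      rw [PySem.Chars.replace.go]
      have hplen : 1 ≤ p.length := by
        cases p with
        | nil => exact absurd rfl hp
        | cons _ _ => simp
      by_cases hpre : p.isPrefixOf (a :: t) = true
      · rw [if_pos hpre]
        have hdrop : (a :: t).drop p.length = t.drop (p.length - 1) := by
          cases hlp : p.length with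
          | zero => omega
          | succ k => simp
        rw [hdrop]
        rw [ih (t.drop (p.length - 1)) (m.reverse ++ acc)
          (by simp only [List.length_drop, List.length_cons] at hl ⊢; omega)]
        rw [pvRep_cons, if_pos (by simp [hpre, hp])]
        simp
      · rw [if_neg hpre]
        rw [ih t (a :: acc) (by simp only [List.length_cons] at hl; omega)]
        rw [pvRep_cons, if_neg (by simp [hpre])]
        simp

lemma pvReplaceEq (s p m : List Char) (hp : p ≠ []) :
    PySem.Chars.replace s p m = pvRep p m s := by
  rw [PySem.Chars.replace]
  rw [if_neg (by simpa using hp)]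
  rw [pvReplaceGo p m hp s.length s [] le_rfl]
  simp

lemma pvPh_ne_nil (img : List (String × String)) : pvPh img ≠ [] := by
  simp [pvPh, pvMark]

-- ===== VERDICT (by name: the statement is the Claim_ definition above) =====
theorem format_content_with_markdown_spec : Claim_equal_format_content_with_markdown := by
  intro title content_text images hdom hpre
  unfold Spec_format_content_with_markdown
  have hWF := pvPreWF images hpre
  simp only [format_content_with_markdown, format_content_with_markdown_alt]
  rw [pvFoldLines]
  have hchain : images.foldl (fun c img => PySem.Chars.replace c (pvPh img) (pvMd img)) content_text.toList
      = bScan (bTable images) content_text.toList := by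
    have h1 : images.foldl (fun c img => PySem.Chars.replace c (pvPh img) (pvMd img)) content_text.toList
        = images.foldl (fun c img => pvRep (pvPh img) (pvMd img) c) content_text.toList := by
      congr 1
      funext c img
      exact pvReplaceEq c (pvPh img) (pvMd img) (pvPh_ne_nil img)
    rw [h1, pvChain images hWF, ← bScanEq images hWF content_text.toList.length _ le_rfl]
  rw [hchain]
  congr 1
  rw [show (["Title: ".toList ++ title.toList, [], "--- IMAGES ---".toList] ++
        images.map pvHeaderLine ++ [[], "--- CONTENT WITH IMAGE POSITIONS ---".toList, []] ++
        [bScan (bTable images) content_text.toList])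
      = ("Title: ".toList ++ title.toList) ::
        ([] :: "--- IMAGES ---".toList :: images.map pvHeaderLine ++
         [[], "--- CONTENT WITH IMAGE POSITIONS ---".toList, [],
          bScan (bTable images) content_text.toList]) from by simp]
  rw [pvJoinShape]
  simp only [List.flatMap_cons, List.flatMap_append, List.flatMap_map]
  simp only [funext fun img => bLine_eq img]
  simp [List.append_assoc]
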